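-- pv_equiv track=rewrite | github.com/acmucsd/sdctf-2022 | crypto/hard - kleptomanic/solve.py | exp_field
-- ===== SOURCE A (Python) =====
-- def mult_field(t1, t2, p, e):
--     (x1, y1) = t1
--     (x2, y2) = t2
--     return ((x1*x2 + y1*y2*e) % p, (x1*y2 + x2*y1) % p)
--
-- def exp_field(t, n, p, e):
--     (x, y) = t
--     if n == 1:
--         return (x, y)
--     if n % 2 == 0:
--         halved_result = exp_field((x, y), n//2, p, e)
--         return mult_field(halved_result, halved_result, p, e)
--     smaller_result = exp_field((x, y), n-1, p, e)
--     return mult_field(smaller_result, (x, y), p, e)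
-- ===== SOURCE B (Python) =====
-- def mult_field(t1, t2, p, e):
--     (x1, y1) = t1
--     (x2, y2) = t2
--     return ((x1*x2 + y1*y2*e) % p, (x1*y2 + x2*y1) % p)
--
-- def exp_field(t, n, p, e):
--     # iterative MSB-first binary exponentiation; bits after the leading 1-bit
--     bits = bin(n)[3:]
--     result = t
--     for b in bits:
--         result = mult_field(result, result, p, e)
--         if b == '1':
--             result = mult_field(result, t, p, e)
--     return result
-- ===== Notes on version B (the rewrite author's own statement) =====
-- stated objective: alternative
-- what changed: Replaced A's recursive square-and-multiply (recursing on n//2 / n-1) by an iterative MSB-first binary exponentiation over the bits of n (bin(n)[3:]) with an explicit accumulator; mult_field unchanged; Pre_ excludes n <= 0 (A recurses forever) and p == 0 with n > 1 (A raises ZeroDivisionError).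
import Mathlib
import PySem

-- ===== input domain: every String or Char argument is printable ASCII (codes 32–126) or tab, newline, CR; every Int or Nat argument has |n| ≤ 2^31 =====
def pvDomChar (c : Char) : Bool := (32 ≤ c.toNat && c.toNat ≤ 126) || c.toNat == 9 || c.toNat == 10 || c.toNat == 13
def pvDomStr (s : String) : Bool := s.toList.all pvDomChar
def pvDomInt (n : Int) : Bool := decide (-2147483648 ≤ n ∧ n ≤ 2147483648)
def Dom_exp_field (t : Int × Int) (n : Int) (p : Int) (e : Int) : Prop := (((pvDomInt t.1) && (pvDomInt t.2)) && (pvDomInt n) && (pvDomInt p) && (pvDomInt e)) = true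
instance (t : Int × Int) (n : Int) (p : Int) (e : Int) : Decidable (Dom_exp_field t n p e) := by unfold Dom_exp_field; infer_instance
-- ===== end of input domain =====

-- B replaces A's recursive square-and-multiply by an iterative MSB-first binary
-- exponentiation over the bits of n (alternative decomposition, same cost).


-- ===== PORT A =====
def mult_field (t1 t2 : Int × Int) (p : Int) (e : Int) : Int × Int :=
  (PySem.Int.mod (t1.1 * t2.1 + t1.2 * t2.2 * e) p,
   PySem.Int.mod (t1.1 * t2.2 + t2.1 * t1.2) p)

-- Python A diverges for n ≤ 0; the guard 'n ≤ 0' only makes the port total there (outside Pre_).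
def exp_field (t : Int × Int) (n : Int) (p : Int) (e : Int) : Int × Int :=
  if n = 1 then t
  else if n ≤ 0 then t
  else if PySem.Int.mod n 2 = 0 then
    let halved_result := exp_field t (PySem.Int.floordiv n 2) p e
    mult_field halved_result halved_result p e
  else
    mult_field (exp_field t (n - 1) p e) t p e
termination_by n.toNat
decreasing_by
  · have h := PySem.Int.floordiv_eq_ediv_of_pos (a := n) (b := 2) (by omega)
    omega
  · omega

-- ===== PORT B =====
-- bits of n after the leading 1-bit, MSB first (= bin(n)[3:] for n ≥ 1)
def pvBits (m : Nat) : List Bool :=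
  if m ≤ 1 then [] else pvBits (m / 2) ++ [decide (m % 2 = 1)]

-- bin(n)[3:] for n < 0 ('-0b…'[3:]) is the FULL bit string of |n|
def pvFullBits (m : Nat) : List Bool :=
  if m = 0 then [] else pvFullBits (m / 2) ++ [decide (m % 2 = 1)]

def exp_field_alt (t : Int × Int) (n : Int) (p : Int) (e : Int) : Int × Int :=
  (if n < 0 then pvFullBits n.natAbs else pvBits n.toNat).foldl
    (fun result b =>
      let s := mult_field result result p e
      if b then mult_field s t p e else s) t

-- ===== PRECONDITION & SPEC =====
-- Pre_ excludes n ≤ 0 (Python A recurses forever, RecursionError) and p = 0 with n > 1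
-- (mult_field raises ZeroDivisionError); A returns normally exactly on Pre_.
def Pre_exp_field (t : Int × Int) (n : Int) (p : Int) (e : Int) : Prop :=
  1 ≤ n ∧ (n = 1 ∨ p ≠ 0)
instance (t : Int × Int) (n : Int) (p : Int) (e : Int) : Decidable (Pre_exp_field t n p e) := by unfold Pre_exp_field; infer_instance
def pvWitness_exp_field : (Int × Int) × Int × Int × Int := ((2, 3), 5, 7, 2)

def Spec_exp_field (t : Int × Int) (n : Int) (p : Int) (e : Int) (out : Int × Int) : Prop := out = exp_field_alt t n p e
instance (t : Int × Int) (n : Int) (p : Int) (e : Int) (out : Int × Int) : Decidable (Spec_exp_field t n p e out) := by unfold Spec_exp_field; infer_instance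

-- ===== CLAIM (what is proved, stated in full; the proofs are below) =====
def Claim_equal_exp_field : Prop := ∀ (t : Int × Int) (n : Int) (p : Int) (e : Int), Dom_exp_field t n p e → Pre_exp_field t n p e → Spec_exp_field t n p e (exp_field t n p e)

-- ===== LEMMAS AND PROOFS =====

theorem pvBits_step (m : Nat) (h : 2 ≤ m) :
    pvBits m = pvBits (m / 2) ++ [decide (m % 2 = 1)] := by
  rw [pvBits]; simp [Nat.not_le.mpr (by omega : 1 < m)]

theorem exp_field_alt_concat (t : Int × Int) (p e : Int) (l : List Bool) (b : Bool) :
    (l ++ [b]).foldl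
      (fun result c =>
        let s := mult_field result result p e
        if c then mult_field s t p e else s) t
    = (let s := mult_field (l.foldl (fun result c =>
          let s := mult_field result result p e
          if c then mult_field s t p e else s) t) (l.foldl (fun result c =>
          let s := mult_field result result p e
          if c then mult_field s t p e else s) t) p e;
        if b then mult_field s t p e else s) := by
  simp [List.foldl_append]

theorem exp_field_main (t : Int × Int) (p e : Int) (n : Int) (hn : 1 ≤ n) :
    exp_field t n p e = exp_field_alt t n p e := by
  induction hk : n.toNat using Nat.strong_induction_on generalizing n with
  | _ k ih =>
  rcases eq_or_lt_of_le hn with h1 | h2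
  · -- n = 1
    rw [exp_field]
    simp [← h1, exp_field_alt, pvBits]
  · -- n ≥ 2
    have hmod := PySem.Int.mod_eq_emod_of_pos (a := n) (b := 2) (by omega)
    have hdiv := PySem.Int.floordiv_eq_ediv_of_pos (a := n) (b := 2) (by omega)
    have hbits : pvBits n.toNat = pvBits (n.toNat / 2) ++ [decide (n.toNat % 2 = 1)] :=
      pvBits_step n.toNat (by omega)
    have hcast : (PySem.Int.floordiv n 2).toNat = n.toNat / 2 := by omega
    have hd1 : 1 ≤ PySem.Int.floordiv n 2 := by omega
    have hdlt : (PySem.Int.floordiv n 2).toNat < k := by omega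
    have IHd := ih _ hdlt (n := PySem.Int.floordiv n 2) hd1 rfl
    by_cases hev : PySem.Int.mod n 2 = 0
    · -- even
      rw [exp_field]
      simp only [if_neg (by omega : ¬ n = 1), if_neg (by omega : ¬ n ≤ 0), if_pos hev]
      have hm2 : n.toNat % 2 = 0 := by omega
      rw [exp_field_alt, if_neg (by omega : ¬ n < 0), hbits, exp_field_alt_concat]
      rw [exp_field_alt, if_neg (by omega : ¬ PySem.Int.floordiv n 2 < 0), hcast] at IHd
      rw [IHd]
      simp [hm2]
    · -- odd, n ≥ 3
      have hm2 : n.toNat % 2 = 1 := by omega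
      have hn3 : 3 ≤ n := by omega
      rw [exp_field]
      simp only [if_neg (by omega : ¬ n = 1), if_neg (by omega : ¬ n ≤ 0), if_neg hev]
      -- unfold exp_field at n-1 (even, ≥ 2)
      have hev' : PySem.Int.mod (n - 1) 2 = 0 := by
        have := PySem.Int.mod_eq_emod_of_pos (a := n - 1) (b := 2) (by omega); omega
      have hdiv' : PySem.Int.floordiv (n - 1) 2 = PySem.Int.floordiv n 2 := by
        have := PySem.Int.floordiv_eq_ediv_of_pos (a := n - 1) (b := 2) (by omega); omega
      rw [exp_field]
      simp only [if_neg (by omega : ¬ n - 1 = 1), if_neg (by omega : ¬ n - 1 ≤ 0),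
        if_pos hev', hdiv']
      rw [exp_field_alt, if_neg (by omega : ¬ n < 0), hbits, exp_field_alt_concat]
      rw [exp_field_alt, if_neg (by omega : ¬ PySem.Int.floordiv n 2 < 0), hcast] at IHd
      rw [IHd]
      simp [hm2]

-- ===== VERDICT (by name: the statement is the Claim_ definition above) =====
theorem exp_field_spec : Claim_equal_exp_field := by
  intro t n p e _hDom hPre
  unfold Spec_exp_field
  exact exp_field_main t p e n hPre.1
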